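-- pv_equiv track=rewrite | github.com/janj3143/careertrojan---antigravity | apps/admin/pages/24_Career_Pattern_Intelligence.py | detect_career_patterns
-- ===== SOURCE A (Python) =====
-- def detect_career_patterns(cv_text):
--     """Detect non-traditional career patterns in CV"""
--     text_lower = cv_text.lower()
--     patterns = []
--
--     if 'onc' in text_lower and 'hnc' in text_lower and ('degree' in text_lower or 'bsc' in text_lower):
--         patterns.append('onc_to_degree')
--     if 'apprentice' in text_lower and any(t in text_lower for t in ['senior', 'lead', 'manager', 'director']):
--         patterns.append('apprentice_to_leader')
--     if 'polytechnic' in text_lower and any(t in text_lower for t in ['senior', 'lead', 'manager']):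
--         patterns.append('polytechnic_to_leader')
--     if 'mature student' in text_lower:
--         patterns.append('mature_student')
--     if any(p in text_lower for p in ['failed a-level', 'failed exam', 'resit']):
--         patterns.append('failed_to_success')
--
--     return patterns
-- ===== SOURCE B (Python) =====
-- RULES = [
--     ('onc_to_degree', [['onc'], ['hnc'], ['degree', 'bsc']]),
--     ('apprentice_to_leader', [['apprentice'], ['senior', 'lead', 'manager', 'director']]),
--     ('polytechnic_to_leader', [['polytechnic'], ['senior', 'lead', 'manager']]),
--     ('mature_student', [['mature student']]),
--     ('failed_to_success', [['failed a-level', 'failed exam', 'resit']]),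
-- ]
--
-- TOKENS = ['onc', 'hnc', 'degree', 'bsc', 'apprentice', 'senior', 'lead',
--           'manager', 'director', 'polytechnic', 'mature student',
--           'failed a-level', 'failed exam', 'resit']
--
-- def detect_career_patterns(cv_text):
--     """Detect non-traditional career patterns in CV.
--
--     One left-to-right pass over the lowercased text collects the set of
--     keywords that occur (checking each position for a keyword starting
--     there), then the patterns are read off that set via a rule table."""
--     text_lower = cv_text.lower()
--     found = set()
--     for i in range(len(text_lower)):
--         for tok in TOKENS:
--             if text_lower.startswith(tok, i):
--                 found.add(tok)
--     return [name for name, groups in RULES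
--             if all(any(tok in found for tok in group) for group in groups)]
-- ===== Notes on version B (the rewrite author's own statement) =====
-- stated objective: alternative
-- what changed: Instead of fourteen independent substring scans wired into five bespoke if/append branches, B makes one left-to-right pass over the text collecting the set of keywords that start at each position, then reads the patterns off that occurrence set with a uniform rule table; it trades Python's fast native substring search for a single explicit positional scan.
import Mathlib
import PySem

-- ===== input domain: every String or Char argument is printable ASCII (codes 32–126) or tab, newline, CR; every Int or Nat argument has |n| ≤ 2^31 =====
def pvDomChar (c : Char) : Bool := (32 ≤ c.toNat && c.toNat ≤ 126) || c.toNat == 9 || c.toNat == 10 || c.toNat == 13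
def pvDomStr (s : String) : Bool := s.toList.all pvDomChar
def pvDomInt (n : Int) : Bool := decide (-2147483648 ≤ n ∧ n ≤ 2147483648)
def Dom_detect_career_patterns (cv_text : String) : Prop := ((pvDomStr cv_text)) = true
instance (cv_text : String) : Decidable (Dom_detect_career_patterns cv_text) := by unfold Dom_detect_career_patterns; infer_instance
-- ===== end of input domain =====

-- B replaces A's fourteen independent substring scans and five bespoke branches by a single
-- positional pass collecting the set of occurring keywords, read off via a rule table (objective: alternative).


-- ===== PORT A =====
def detect_career_patterns (cv_text : String) : List String :=
  let text_lower := PySem.Str.lower cv_text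
  let patterns : List String := []
  let patterns := if PySem.Str.isIn "onc" text_lower && PySem.Str.isIn "hnc" text_lower &&
      (PySem.Str.isIn "degree" text_lower || PySem.Str.isIn "bsc" text_lower)
    then patterns ++ ["onc_to_degree"] else patterns
  let patterns := if PySem.Str.isIn "apprentice" text_lower &&
      (["senior", "lead", "manager", "director"].any fun t => PySem.Str.isIn t text_lower)
    then patterns ++ ["apprentice_to_leader"] else patterns
  let patterns := if PySem.Str.isIn "polytechnic" text_lower &&
      (["senior", "lead", "manager"].any fun t => PySem.Str.isIn t text_lower)
    then patterns ++ ["polytechnic_to_leader"] else patterns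
  let patterns := if PySem.Str.isIn "mature student" text_lower
    then patterns ++ ["mature_student"] else patterns
  let patterns := if ["failed a-level", "failed exam", "resit"].any fun p => PySem.Str.isIn p text_lower
    then patterns ++ ["failed_to_success"] else patterns
  patterns

-- ===== PORT B =====
def pvRules : List (String × List (List String)) :=
  [("onc_to_degree", [["onc"], ["hnc"], ["degree", "bsc"]]),
   ("apprentice_to_leader", [["apprentice"], ["senior", "lead", "manager", "director"]]),
   ("polytechnic_to_leader", [["polytechnic"], ["senior", "lead", "manager"]]),
   ("mature_student", [["mature student"]]),
   ("failed_to_success", [["failed a-level", "failed exam", "resit"]])]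

def pvTokens : List String :=
  ["onc", "hnc", "degree", "bsc", "apprentice", "senior", "lead",
   "manager", "director", "polytechnic", "mature student",
   "failed a-level", "failed exam", "resit"]

-- t.startswith(tok, i) for 0 ≤ i is exactly 'tok.toList is a prefix of t.toList.drop i'
def pvScan (lc : List Char) : PySem.Set String :=
  (List.range lc.length).foldl
    (fun found i => pvTokens.foldl
      (fun found tok =>
        if PySem.Chars.startswith (lc.drop i) tok.toList then PySem.Set.add found tok else found)
      found)
    PySem.Set.empty

def detect_career_patterns_alt (cv_text : String) : List String :=
  let text_lower := PySem.Str.lower cv_text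
  let found := pvScan text_lower.toList
  (pvRules.filter fun r =>
    r.2.all fun group => group.any fun tok => PySem.Set.contains found tok).map Prod.fst

-- ===== PRECONDITION & SPEC =====
def Spec_detect_career_patterns (cv_text : String) (out : List String) : Prop := out = detect_career_patterns_alt cv_text
instance (cv_text : String) (out : List String) : Decidable (Spec_detect_career_patterns cv_text out) := by unfold Spec_detect_career_patterns; infer_instance

-- ===== CLAIM (what is proved, stated in full; the proofs are below) =====
def Claim_equal_detect_career_patterns : Prop := ∀ (cv_text : String), Dom_detect_career_patterns cv_text → Spec_detect_career_patterns cv_text (detect_career_patterns cv_text)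

-- ===== LEMMAS AND PROOFS =====

-- one inner pass (over the token list) adds exactly the tokens starting at position i
lemma mem_inner (lc : List Char) (i : Nat) (tok : String) :
    ∀ (toks : List String) (found : List String),
      tok ∈ (toks.foldl
        (fun found t =>
          if PySem.Chars.startswith (lc.drop i) t.toList then PySem.Set.add found t else found)
        found) ↔
      tok ∈ found ∨ (tok ∈ toks ∧ PySem.Chars.startswith (lc.drop i) tok.toList = true) := by
  intro toks
  induction toks with
  | nil => intro found; simp
  | cons t ts ih =>
    intro found
    rw [List.foldl_cons, ih]
    by_cases hs : PySem.Chars.startswith (lc.drop i) t.toList = true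
    · rw [if_pos hs]
      simp only [PySem.Set.mem_add, List.mem_cons]
      constructor
      · rintro (⟨h | rfl⟩ | ⟨h1, h2⟩)
        · exact Or.inl h
        · exact Or.inr ⟨Or.inl rfl, hs⟩
        · exact Or.inr ⟨Or.inr h1, h2⟩
      · rintro (h | ⟨rfl | h1, h2⟩)
        · exact Or.inl (Or.inl h)
        · exact Or.inl (Or.inr rfl)
        · exact Or.inr ⟨h1, h2⟩
    · rw [if_neg hs]
      simp only [List.mem_cons]
      constructor
      · rintro (h | ⟨h1, h2⟩)
        · exact Or.inl h
        · exact Or.inr ⟨Or.inr h1, h2⟩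
      · rintro (h | ⟨rfl | h1, h2⟩)
        · exact Or.inl h
        · exact (hs h2).elim
        · exact Or.inr ⟨h1, h2⟩

-- the full scan collects exactly the table tokens that start at some position < length
lemma mem_scan (lc : List Char) (tok : String) :
    tok ∈ pvScan lc ↔
      tok ∈ pvTokens ∧ ∃ i < lc.length, PySem.Chars.startswith (lc.drop i) tok.toList = true := by
  unfold pvScan
  have h : ∀ (n : Nat) (found : List String),
      tok ∈ ((List.range n).foldl
        (fun found i => pvTokens.foldl
          (fun found t =>
            if PySem.Chars.startswith (lc.drop i) t.toList then PySem.Set.add found t else found)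
          found) found) ↔
      tok ∈ found ∨ (tok ∈ pvTokens ∧ ∃ i < n, PySem.Chars.startswith (lc.drop i) tok.toList = true) := by
    intro n
    induction n with
    | zero => intro found; simp
    | succ m ih =>
      intro found
      rw [List.range_succ, List.foldl_append, List.foldl_cons, List.foldl_nil,
        mem_inner, ih]
      constructor
      · rintro ((h | ⟨h1, i, hi, h2⟩) | ⟨h1, h2⟩)
        · exact Or.inl h
        · exact Or.inr ⟨h1, i, Nat.lt_succ_of_lt hi, h2⟩
        · exact Or.inr ⟨h1, m, Nat.lt_succ_self m, h2⟩
      · rintro (h | ⟨h1, i, hi, h2⟩)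
        · exact Or.inl (Or.inl h)
        · rcases Nat.lt_succ_iff_lt_or_eq.mp hi with hi' | rfl
          · exact Or.inl (Or.inr ⟨h1, i, hi', h2⟩)
          · exact Or.inr ⟨h1, h2⟩
  rw [h lc.length PySem.Set.empty]
  simp [PySem.Set.empty]

-- for a nonempty table token, membership in the scan is exactly Python's 'tok in text'
lemma contains_scan (lc : List Char) (tok : String)
    (h1 : tok ∈ pvTokens) (h2 : tok.toList ≠ []) :
    PySem.Set.contains (pvScan lc) tok = PySem.Chars.isIn tok.toList lc := by
  rcases hb : PySem.Chars.isIn tok.toList lc with _ | _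
  · have hb' := (PySem.Chars.isIn_eq_false_iff tok.toList lc).mp hb
    rw [PySem.Set.contains_eq_listContains, Bool.eq_false_iff]
    intro hmem
    rw [List.contains_iff_mem, mem_scan] at hmem
    rcases hmem with ⟨-, i, -, hpre⟩
    rw [PySem.Chars.startswith_iff] at hpre
    rcases hpre with ⟨t, ht⟩
    exact hb' ⟨lc.take i, t, by rw [List.append_assoc, ht, List.take_append_drop]⟩
  · have hinf := (PySem.Chars.isIn_iff_infix tok.toList lc).mp hb
    rcases hinf with ⟨s, t, hst⟩
    have hpos : 0 < tok.toList.length := List.length_pos_of_ne_nil h2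
    have hlen := congrArg List.length hst
    simp only [List.length_append] at hlen
    have hlt : s.length < lc.length := by omega
    rw [PySem.Set.contains_eq_listContains, List.contains_iff_mem, mem_scan]
    refine ⟨h1, s.length, hlt, ?_⟩
    rw [PySem.Chars.startswith_iff]
    have hdrop : lc.drop s.length = tok.toList ++ t := by
      rw [← hst]; simp
    rw [hdrop]
    exact List.prefix_append _ _

-- ===== VERDICT (by name: the statement is the Claim_ definition above) =====
theorem detect_career_patterns_spec : Claim_equal_detect_career_patterns := by
  intro cv_text _
  unfold Spec_detect_career_patterns
  show detect_career_patterns cv_text = detect_career_patterns_alt cv_text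
  dsimp only [detect_career_patterns, detect_career_patterns_alt, pvRules]
  simp only [List.filter_cons, List.filter_nil,
    List.all_cons, List.all_nil, List.any_cons, List.any_nil, Bool.and_true, Bool.or_false]
  rw [contains_scan _ "onc" (by decide) (by decide),
     contains_scan _ "hnc" (by decide) (by decide),
     contains_scan _ "degree" (by decide) (by decide),
     contains_scan _ "bsc" (by decide) (by decide),
     contains_scan _ "apprentice" (by decide) (by decide),
     contains_scan _ "senior" (by decide) (by decide),
     contains_scan _ "lead" (by decide) (by decide),
     contains_scan _ "manager" (by decide) (by decide),
     contains_scan _ "director" (by decide) (by decide),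
     contains_scan _ "polytechnic" (by decide) (by decide),
     contains_scan _ "mature student" (by decide) (by decide),
     contains_scan _ "failed a-level" (by decide) (by decide),
     contains_scan _ "failed exam" (by decide) (by decide),
     contains_scan _ "resit" (by decide) (by decide)]
  simp only [PySem.Str.isIn_eq, Bool.and_assoc]
  split_ifs <;> rfl
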